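-- pv_equiv track=rewrite | github.com/Chat-INU/ChatINU | utils.py | add_definitions_to_message
-- ===== SOURCE A (Python) =====
-- def add_definitions_to_message(user_msg, word_dict):
--     words = user_msg.split()  # 공백으로 단어를 나눔
--     modified_msg = []
--
--     for word in words:
--         found = False
--         for key in word_dict:
--             if key in word:  # 부분 일치 여부 확인
--                 modified_msg.append(f"{word} ({word_dict[key]})")
--                 found = True
--                 break
--         if not found:
--             modified_msg.append(word)
--
--     return ' '.join(modified_msg)
-- ===== SOURCE B (Python) =====
-- def add_definitions_to_message(user_msg, word_dict):
--     # Key-major traversal: sweep each dict entry once over all words,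
--     # annotating a word only if no earlier key already annotated it.
--     words = user_msg.split()
--     ann = [None] * len(words)
--     for key, definition in word_dict.items():
--         ann = [a if a is not None else (f"{w} ({definition})" if key in w else None)
--                for w, a in zip(words, ann)]
--     return ' '.join(a if a is not None else w for a, w in zip(ann, words))
-- ===== Notes on version B (the rewrite author's own statement) =====
-- stated objective: alternative
-- what changed: Loop order interchanged: instead of scanning all dict keys per word with a found-flag and break, B sweeps each dict entry once over an annotation array of all words (first key still wins via the None check), then joins.
import Mathlib
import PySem

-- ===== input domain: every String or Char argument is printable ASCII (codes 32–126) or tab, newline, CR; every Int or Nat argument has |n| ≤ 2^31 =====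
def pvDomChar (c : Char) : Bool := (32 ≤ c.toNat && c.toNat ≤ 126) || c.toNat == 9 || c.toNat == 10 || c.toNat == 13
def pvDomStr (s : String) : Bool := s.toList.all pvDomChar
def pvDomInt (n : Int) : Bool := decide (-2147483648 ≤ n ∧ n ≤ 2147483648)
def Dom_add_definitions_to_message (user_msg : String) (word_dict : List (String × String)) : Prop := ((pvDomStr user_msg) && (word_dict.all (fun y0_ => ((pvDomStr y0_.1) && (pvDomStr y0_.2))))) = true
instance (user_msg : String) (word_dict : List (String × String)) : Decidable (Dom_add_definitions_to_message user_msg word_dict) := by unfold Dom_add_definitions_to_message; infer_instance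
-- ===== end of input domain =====

-- B interchanges the loops (one sweep per dict entry over an annotation list of all
-- words, first key wins via the none-check) instead of A's per-word key scan with a
-- found-flag and break; objective: alternative (same cost, different traversal).

-- ===== PORT A =====
-- inner 'for key in word_dict: if key in word: … break' loop, returning the annotated
-- string (f"{word} ({word_dict[key]})") for the first matching key, or none
def pvFindA (d : PySem.Dict String String) (word : String) : List String → Option String
  | [] => none
  | k :: ks =>
      if PySem.Str.isIn k word then some (word ++ " (" ++ d.getD k "" ++ ")")
      else pvFindA d word ks

def add_definitions_to_message (user_msg : String) (word_dict : List (String × String)) : String :=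
  let d := PySem.Dict.ofList word_dict
  let words := PySem.Str.split₀ user_msg
  let modified_msg := words.foldl (fun acc word =>
      match pvFindA d word d.keys with
      | some s => acc ++ [s]      -- found = True, break
      | none => acc ++ [word]) []  -- if not found
  PySem.Str.join " " modified_msg

-- ===== PORT B =====
-- one sweep of a (key, definition) entry over the annotation list (zip comprehension)
def pvSweep (words : List String) (ann : List (Option String)) (kv : String × String) : List (Option String) :=
  (words.zip ann).map (fun p =>
    match p.2 with
    | some a => some a
    | none => if PySem.Str.isIn kv.1 p.1 then some (p.1 ++ " (" ++ kv.2 ++ ")") else none)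

def add_definitions_to_message_alt (user_msg : String) (word_dict : List (String × String)) : String :=
  let d := PySem.Dict.ofList word_dict
  let words := PySem.Str.split₀ user_msg
  let ann := d.items.foldl (pvSweep words) (words.map (fun _ => (none : Option String)))
  PySem.Str.join " " ((ann.zip words).map (fun p => p.1.getD p.2))

-- ===== PRECONDITION & SPEC =====
def Spec_add_definitions_to_message (user_msg : String) (word_dict : List (String × String)) (out : String) : Prop := out = add_definitions_to_message_alt user_msg word_dict
instance (user_msg : String) (word_dict : List (String × String)) (out : String) : Decidable (Spec_add_definitions_to_message user_msg word_dict out) := by unfold Spec_add_definitions_to_message; infer_instance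

-- ===== CLAIM (what is proved, stated in full; the proofs are below) =====
def Claim_equal_add_definitions_to_message : Prop := ∀ (user_msg : String) (word_dict : List (String × String)), Dom_add_definitions_to_message user_msg word_dict → Spec_add_definitions_to_message user_msg word_dict (add_definitions_to_message user_msg word_dict)

-- ===== LEMMAS AND PROOFS =====

def pvFirst (word : String) : List (String × String) → Option String
  | [] => none
  | (k, v) :: ps =>
      if PySem.Str.isIn k word then some (word ++ " (" ++ v ++ ")") else pvFirst word ps

theorem pvFirst_append (word : String) (ps qs : List (String × String)) :
    pvFirst word (ps ++ qs) = ((pvFirst word ps).elim (pvFirst word qs) some) := by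
  induction ps with
  | nil => simp [pvFirst]
  | cons p ps ih => cases p; simp [pvFirst]; split <;> simp [ih]

-- A's key scan + dict lookup = first-match over the items list
theorem pvFindA_eq_pvFirst (d : PySem.Dict String String) (word : String)
    (ps : List (String × String)) (h : ∀ k v, (k, v) ∈ ps → d.get? k = some v) :
    pvFindA d word (ps.map Prod.fst) = pvFirst word ps := by
  induction ps with
  | nil => rfl
  | cons p ps ih =>
    cases p with
    | mk k v =>
      have hk : d.getD k "" = v := by
        simp [PySem.Dict.getD_eq_get?_getD, h k v (by simp)]
      simp only [List.map_cons, pvFindA, pvFirst, hk]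
      split
      · rfl
      · exact ih (fun k' v' hm => h k' v' (by simp [hm]))

-- B's sweep fold = per-word first-match over the items processed so far
theorem pvSweep_foldl (ps qs : List (String × String)) (words : List String) :
    ps.foldl (pvSweep words) (words.map (fun w => pvFirst w qs)) =
      words.map (fun w => pvFirst w (qs ++ ps)) := by
  induction ps generalizing qs with
  | nil => simp
  | cons p ps ih =>
    have hstep : pvSweep words (words.map (fun w => pvFirst w qs)) p =
        words.map (fun w => pvFirst w (qs ++ [p])) := by
      cases p with
      | mk k v =>
        unfold pvSweep
        have hz : words.zip (words.map (fun w => pvFirst w qs)) =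
            words.map (fun w => (w, pvFirst w qs)) := by
          simpa using List.zip_map' (f := id) (g := fun w => pvFirst w qs) (l := words)
        rw [hz, List.map_map]
        refine List.map_congr_left (fun w _ => ?_)
        simp only [Function.comp, pvFirst_append]
        cases pvFirst w qs <;> simp [pvFirst, Option.elim]
    calc (p :: ps).foldl (pvSweep words) (words.map (fun w => pvFirst w qs))
        = ps.foldl (pvSweep words) (words.map (fun w => pvFirst w (qs ++ [p]))) := by
          rw [List.foldl_cons, hstep]
      _ = words.map (fun w => pvFirst w ((qs ++ [p]) ++ ps)) := ih (qs ++ [p])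
      _ = words.map (fun w => pvFirst w (qs ++ p :: ps)) := by simp

-- ===== VERDICT (by name: the statement is the Claim_ definition above) =====
theorem add_definitions_to_message_spec : Claim_equal_add_definitions_to_message := by
  intro user_msg word_dict _
  unfold Spec_add_definitions_to_message add_definitions_to_message add_definitions_to_message_alt
  set d := PySem.Dict.ofList word_dict with hd
  set words := PySem.Str.split₀ user_msg with hw
  have hnd : d.keys.Nodup := by rw [hd]; exact PySem.Dict.nodup_keys_ofList word_dict
  have hitems : ∀ k v, (k, v) ∈ d.items → d.get? k = some v := fun k v hm =>
    PySem.Dict.get?_of_mem_items d hm hnd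
  have hkeys : d.keys = d.items.map Prod.fst := rfl
  -- A's per-word scan is pvFirst over the items
  have hA : words.foldl (fun acc word =>
      match pvFindA d word d.keys with
      | some s => acc ++ [s]
      | none => acc ++ [word]) [] =
      words.map (fun w => (pvFirst w d.items).getD w) := by
    have hfun : (fun (acc : List String) word =>
        match pvFindA d word d.keys with
        | some s => acc ++ [s]
        | none => acc ++ [word]) =
        (fun acc word => acc ++ [(pvFirst word d.items).getD word]) := by
      funext acc word
      rw [hkeys, pvFindA_eq_pvFirst d word d.items hitems]
      cases pvFirst word d.items <;> rfl
    rw [hfun, PySem.List.foldl_append_singleton_eq_map]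
    rfl
  -- B's fold of sweeps is pvFirst over the items, per word
  have hB : d.items.foldl (pvSweep words) (words.map (fun _ => (none : Option String))) =
      words.map (fun w => pvFirst w d.items) := by
    have h0 : (fun (_ : String) => (none : Option String)) = (fun w => pvFirst w []) := rfl
    rw [h0, pvSweep_foldl d.items [] words, List.nil_append]
  have hz : (words.map (fun w => pvFirst w d.items)).zip words =
      words.map (fun w => (pvFirst w d.items, w)) := by
    simpa using List.zip_map' (f := fun w => pvFirst w d.items) (g := id) (l := words)
  have hmain : words.foldl (fun acc word =>
      match pvFindA d word d.keys with
      | some s => acc ++ [s]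
      | none => acc ++ [word]) [] =
      List.map (fun p => Option.getD p.1 p.2)
        ((d.items.foldl (pvSweep words) (words.map (fun _ => (none : Option String)))).zip words) := by
    rw [hA, hB, hz, List.map_map]
    rfl
  exact congrArg (PySem.Str.join " ") hmain
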